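-- pv_equiv track=rewrite | github.com/whmruiz07/stockscanning | momentum_screener_streamlit.py | parse_custom_tickers
-- ===== SOURCE A (Python) =====
-- def parse_custom_tickers(raw: str):
--     if not raw:
--         return []
--     parts = [p.strip().upper() for p in raw.replace("\n", " ").replace("\t", " ").replace(";", " ").replace("|"," ").split(" ") if p.strip()]
--     # Also split by comma
--     out = []
--     for item in parts:
--         out.extend([x.strip() for x in item.split(",") if x.strip()])
--     # Remove duplicates & invalids
--     out = [x.replace(".", "-") for x in out if x.isascii()]
--     return sorted(list(dict.fromkeys(out)))
-- ===== SOURCE B (Python) =====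
-- def parse_custom_tickers(raw: str):
--     # one-pass character tokenizer instead of replace-chain + nested splits
--     seen = set()
--     buf = []
--     for ch in raw + " ":
--         if ch in " \t\n;|,":
--             tok = "".join(buf).strip().upper()
--             buf = []
--             if tok and tok.isascii():
--                 seen.add(tok.replace(".", "-"))
--         else:
--             buf.append(ch)
--     return sorted(seen)
-- ===== Notes on version B (the rewrite author's own statement) =====
-- stated objective: alternative
-- what changed: Replaced the four-fold replace() pass, the space split, and the nested comma-splitting loop by a single one-pass character tokenizer that cuts on the whole delimiter set at once and normalizes/dedups each token into a set as it is emitted.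
import Mathlib
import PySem

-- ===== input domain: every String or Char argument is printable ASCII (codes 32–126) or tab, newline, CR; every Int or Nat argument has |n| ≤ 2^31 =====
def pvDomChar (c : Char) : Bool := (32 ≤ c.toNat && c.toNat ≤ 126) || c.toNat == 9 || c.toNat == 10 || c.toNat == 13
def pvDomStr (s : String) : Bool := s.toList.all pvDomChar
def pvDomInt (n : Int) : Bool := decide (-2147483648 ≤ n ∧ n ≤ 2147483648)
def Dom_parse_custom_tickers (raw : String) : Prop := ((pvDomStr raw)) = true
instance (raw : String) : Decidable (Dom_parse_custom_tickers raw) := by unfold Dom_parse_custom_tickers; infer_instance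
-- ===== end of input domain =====

-- B replaces A's four replace() passes + space split + inner comma-splitting loop by one
-- single-pass character tokenizer over the whole delimiter set (alternative decomposition, same cost).

-- ===== PORT A =====
-- str.isascii() has no PySem primitive; ported by hand, exact: all code points ≤ 127 (True on "").
def pyIsascii (s : String) : Bool := s.toList.all (fun c => c.toNat ≤ 127)

-- one definition per local variable of A (cleaned/parts/out/out2)
def pcaA_cleaned (raw : String) : String :=
  PySem.Str.replace (PySem.Str.replace (PySem.Str.replace
    (PySem.Str.replace raw "\n" " ") "\t" " ") ";" " ") "|" " "

def pcaA_parts (raw : String) : List String :=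
  -- .split(" "): the separator is nonempty, so Python cannot raise; `none` is unreachable
  ((PySem.Str.split? (pcaA_cleaned raw) " ").getD []).filterMap
    (fun p => if PySem.Str.strip p ≠ "" then some (PySem.Str.upper (PySem.Str.strip p)) else none)

def pcaA_out (raw : String) : List String :=
  (pcaA_parts raw).foldl
    (fun out item => out ++ ((PySem.Str.split? item ",").getD []).filterMap
      (fun x => if PySem.Str.strip x ≠ "" then some (PySem.Str.strip x) else none)) []

def pcaA_out2 (raw : String) : List String :=
  ((pcaA_out raw).filter (fun x => pyIsascii x)).map (fun x => PySem.Str.replace x "." "-")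

def parse_custom_tickers (raw : String) : List String :=
  if raw = "" then []
  else PySem.List.sorted (PySem.List.dedup (pcaA_out2 raw)) (fun x => x)

-- ===== PORT B =====
def pcaDelim (c : Char) : Bool :=
  c == ' ' || c == '\t' || c == '\n' || c == ';' || c == '|' || c == ','

-- the loop body of Source B
def pcaStep (st : PySem.Set String × List Char) (ch : Char) : PySem.Set String × List Char :=
  if pcaDelim ch then
    let tok := PySem.Chars.upper (PySem.Chars.strip st.2)
    if tok ≠ [] ∧ tok.all (fun c => c.toNat ≤ 127) then   -- tok truthy and tok.isascii() (hand-ported, exact)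
      (PySem.Set.add st.1 (String.ofList (PySem.Chars.replace tok ['.'] ['-'])), ([] : List Char))
    else (st.1, [])
  else (st.1, st.2 ++ [ch])

def parse_custom_tickers_alt (raw : String) : List String :=
  PySem.List.sorted ((raw.toList ++ [' ']).foldl pcaStep (PySem.Set.empty, [])).1 (fun x => x)

-- ===== PRECONDITION & SPEC =====
def Spec_parse_custom_tickers (raw : String) (out : List String) : Prop := out = parse_custom_tickers_alt raw
instance (raw : String) (out : List String) : Decidable (Spec_parse_custom_tickers raw out) := by unfold Spec_parse_custom_tickers; infer_instance

-- ===== CLAIM (what is proved, stated in full; the proofs are below) =====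
def Claim_equal_parse_custom_tickers : Prop := ∀ (raw : String), Dom_parse_custom_tickers raw → Spec_parse_custom_tickers raw (parse_custom_tickers raw)

-- ===== LEMMAS AND PROOFS =====

-- generic one-character splitter (specification form of both A's two-level split and B's loop)
def pcaSp (p : Char → Bool) : List Char → List Char → List (List Char)
  | [], cur => [cur]
  | c :: t, cur => if p c then cur :: pcaSp p t [] else pcaSp p t (cur ++ [c])

def pcaSubst (c : Char) : Char :=
  if c = '\n' then ' ' else if c = '\t' then ' ' else if c = ';' then ' ' else if c = '|' then ' ' else c

def pcaS (c : Char) : Bool := c == ' ' || c == '\n' || c == '\t' || c == ';' || c == '|'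

def pcaAscii (s : List Char) : Bool := s.all (fun c => c.toNat ≤ 127)

def pcaDot (s : List Char) : List Char := PySem.Chars.replace s ['.'] ['-']

-- what B emits for one delimiter-free segment
def pcaEmit (q : List Char) : List (List Char) :=
  if PySem.Chars.upper (PySem.Chars.strip q) ≠ [] ∧ pcaAscii (PySem.Chars.upper (PySem.Chars.strip q))
  then [pcaDot (PySem.Chars.upper (PySem.Chars.strip q))] else []

-- A's processing of one comma piece (strip, nonempty filter, ascii filter, dot replace)
def pcaH (q : List Char) : List (List Char) :=
  if PySem.Chars.strip q ≠ [] then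
    (if pcaAscii (PySem.Chars.strip q) then [pcaDot (PySem.Chars.strip q)] else []) else []

-- A's processing of one space-level part
def pcaG (z : List Char) : List (List Char) :=
  if PySem.Chars.strip z ≠ [] then
    ((pcaSp (· == ',') (PySem.Chars.upper (PySem.Chars.strip z)) []).flatMap pcaH) else []

-- the strings B's loop adds to the set, in order
def pcaToks : List Char → List Char → List String
  | [], _ => []
  | c :: t, buf => if pcaDelim c then ((pcaEmit buf).map String.ofList) ++ pcaToks t [] else pcaToks t (buf ++ [c])

-- ---- PySem primitive characterisations ----
theorem go_repl (a b : Char) : ∀ (l : List Char) (fuel : Nat) (acc : List Char), l.length ≤ fuel →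
    PySem.Chars.replace.go [a] [b] fuel l acc = acc.reverse ++ l.map (fun c => if c = a then b else c)
  | [], fuel, acc, _ => by cases fuel <;> simp [PySem.Chars.replace.go.eq_def]
  | c :: t, fuel+1, acc, h => by
    rw [PySem.Chars.replace.go.eq_def]
    simp only [List.isPrefixOf, List.map_cons]
    by_cases hc : a = c
    · subst hc
      simp only [BEq.rfl, Bool.true_and, List.isPrefixOf_nil_left, if_true,
        List.length_cons, List.length_nil, List.drop_succ_cons, List.drop_zero,
        List.reverse_cons, List.reverse_nil, List.nil_append, List.cons_append]
      rw [go_repl a b t fuel (b :: acc) (by simpa using h)]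
      simp
    · have : (a == c) = false := by simp [hc]
      simp only [this, Bool.false_and]
      rw [go_repl a b t fuel (c :: acc) (by simpa using h)]
      simp [Ne.symm hc]

theorem pca_replace_single (s : List Char) (a b : Char) :
    PySem.Chars.replace s [a] [b] = s.map (fun c => if c = a then b else c) := by
  rw [PySem.Chars.replace]
  simp only [List.isEmpty_cons, if_false, Bool.false_eq_true]
  exact (go_repl a b s s.length [] le_rfl).trans (by simp)

theorem go_split (d : Char) : ∀ (l : List Char) (fuel : Nat) (cur : List Char) (acc : List (List Char)), l.length ≤ fuel →
    PySem.Chars.splitOn.go [d] fuel l cur acc = acc.reverse ++ pcaSp (· == d) l cur.reverse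
  | [], fuel, cur, acc, _ => by cases fuel <;> simp [PySem.Chars.splitOn.go, pcaSp]
  | c :: t, fuel+1, cur, acc, h => by
    rw [PySem.Chars.splitOn.go]
    simp only [List.isPrefixOf, pcaSp]
    by_cases hc : d = c
    · subst hc
      simp only [BEq.rfl, Bool.true_and, List.isPrefixOf_nil_left, if_true,
        List.length_cons, List.length_nil, List.drop_succ_cons, List.drop_zero]
      rw [go_split d t fuel [] (cur.reverse :: acc) (by simpa using h)]
      simp [pcaSp]
    · have h1 : (d == c) = false := by simp [hc]
      have h2 : (c == d) = false := by simp [Ne.symm hc]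
      simp only [h1, h2, Bool.false_and]
      rw [go_split d t fuel (c :: cur) acc (by simpa using h)]
      simp

theorem pca_splitOn_single (s : List Char) (d : Char) :
    PySem.Chars.splitOn s [d] = pcaSp (· == d) s [] := by
  rw [PySem.Chars.splitOn]
  exact (go_split d s (s.length + 1) [] [] (by omega)).trans (by simp)

theorem pcaSp_ne_nil (p : Char → Bool) (z : List Char) : ∀ cur, pcaSp p z cur ≠ [] := by
  induction z with
  | nil => intro cur; simp [pcaSp]
  | cons c t ih => intro cur; simp only [pcaSp]; split <;> simp [ih]

theorem pcaSp_cur (p : Char → Bool) (z : List Char) : ∀ cur,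
    pcaSp p z cur = (cur ++ (pcaSp p z []).headI) :: (pcaSp p z []).tail := by
  induction z with
  | nil => intro cur; simp [pcaSp]
  | cons c t ih =>
    intro cur
    simp only [pcaSp]
    split
    · simp
    · simp only [List.nil_append]
      rw [ih (cur ++ [c]), ih [c]]
      simp

theorem pca_getLastD_irrel {α : Type} (l : List α) (h : l ≠ []) (a b : α) :
    l.getLastD a = l.getLastD b := by
  rw [List.getLastD_eq_getLast?, List.getLastD_eq_getLast?]
  obtain ⟨y, hy⟩ := Option.isSome_iff_exists.1 (List.getLast?_isSome.2 h)
  simp [hy]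

theorem pcaSp_append (p : Char → Bool) (xs : List Char) : ∀ (ys cur : List Char),
    pcaSp p (xs ++ ys) cur =
      (pcaSp p xs cur).dropLast ++ pcaSp p ys ((pcaSp p xs cur).getLastD []) := by
  induction xs with
  | nil => intro ys cur; simp [pcaSp]
  | cons c t ih =>
    intro ys cur
    simp only [List.cons_append, pcaSp]
    split
    · rw [ih ys []]
      have hne := pcaSp_ne_nil p t []
      rw [List.dropLast_cons_of_ne_nil hne, List.getLastD_cons]
      rw [pca_getLastD_irrel _ hne cur []]
      simp
    · exact ih ys (cur ++ [c])

theorem pcaSp_no (p : Char → Bool) (z : List Char) : ∀ cur, (∀ c ∈ z, p c = false) →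
    pcaSp p z cur = [cur ++ z] := by
  induction z with
  | nil => intro cur _; simp [pcaSp]
  | cons c t ih =>
    intro cur h
    simp only [pcaSp, h c (by simp), Bool.false_eq_true, if_false]
    rw [ih (cur ++ [c]) (fun x hx => h x (by simp [hx]))]
    simp

theorem pcaSp_congr (p q : Char → Bool) (z : List Char) : ∀ cur, (∀ c ∈ z, p c = q c) →
    pcaSp p z cur = pcaSp q z cur := by
  induction z with
  | nil => intro cur _; simp [pcaSp]
  | cons c t ih =>
    intro cur h
    simp only [pcaSp, h c (by simp)]
    split <;> rw [ih _ (fun x hx => h x (by simp [hx]))]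

theorem pca_toNat_ofNat (n : Nat) (h : n < 55296) : (Char.ofNat n).toNat = n := by
  rw [Char.ofNat, dif_pos (by left; omega : n.isValidChar)]
  simp [Char.ofNatAux, Char.toNat, UInt32.toNat_ofNatLT]

theorem pca_beq_toNat (a b : Char) : (a == b) = decide (a.toNat = b.toNat) := by
  by_cases h : a = b
  · subst h; simp
  · have hn : a.toNat ≠ b.toNat := fun hn => h (Char.ext (UInt32.toNat_inj.mp hn))
    simp [h, hn]

theorem pca_isspace_false (c : Char) (h1 : 65 ≤ c.toNat) (h2 : c.toNat ≤ 122) :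
    PySem.Chars.isspace c = false := by
  unfold PySem.Chars.isspace
  simp only [Bool.or_eq_false_iff, Bool.and_eq_false_iff, decide_eq_false_iff_not]
  omega

theorem pca_upperChar_eq_comma (c : Char) : (PySem.Chars.upperChar c == ',') = (c == ',') := by
  unfold PySem.Chars.upperChar PySem.Chars.islower
  split
  · rename_i h
    simp only [Bool.and_eq_true, decide_eq_true_eq, Char.le_def] at h
    have h1 : 97 ≤ c.toNat := UInt32.le_iff_toNat_le.1 h.1
    have h2 : c.toNat ≤ 122 := UInt32.le_iff_toNat_le.1 h.2
    rw [pca_beq_toNat, pca_beq_toNat, pca_toNat_ofNat _ (by omega)]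
    simp only [decide_eq_decide, show (',').toNat = 44 from rfl]
    constructor <;> (intro hx; omega)
  · rfl

theorem pca_isspace_upperChar (c : Char) :
    PySem.Chars.isspace (PySem.Chars.upperChar c) = PySem.Chars.isspace c := by
  unfold PySem.Chars.upperChar PySem.Chars.islower
  split
  · rename_i h
    simp only [Bool.and_eq_true, decide_eq_true_eq, Char.le_def] at h
    have h1 : 97 ≤ c.toNat := UInt32.le_iff_toNat_le.1 h.1
    have h2 : c.toNat ≤ 122 := UInt32.le_iff_toNat_le.1 h.2
    rw [pca_isspace_false c (by omega) (by omega)]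
    rw [pca_isspace_false _ (by rw [pca_toNat_ofNat _ (by omega)]; omega)
        (by rw [pca_toNat_ofNat _ (by omega)]; omega)]
  · rfl

-- REST
theorem pca_strip_upper (q : List Char) :
    PySem.Chars.strip (PySem.Chars.upper q) = PySem.Chars.upper (PySem.Chars.strip q) := by
  have hws : PySem.Chars.isspace ∘ PySem.Chars.upperChar = PySem.Chars.isspace :=
    funext pca_isspace_upperChar
  unfold PySem.Chars.strip PySem.Chars.rstrip PySem.Chars.lstrip PySem.Chars.upper
  rw [List.dropWhile_map, hws]
  rw [show (List.map PySem.Chars.upperChar (List.dropWhile PySem.Chars.isspace q)).reverse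
      = List.map PySem.Chars.upperChar (List.dropWhile PySem.Chars.isspace q).reverse from by
    simp]
  rw [List.dropWhile_map, hws]
  simp

theorem pcaSp_upper (y cur : List Char) :
    pcaSp (· == ',') (PySem.Chars.upper y) (PySem.Chars.upper cur)
      = (pcaSp (· == ',') y cur).map PySem.Chars.upper := by
  induction y generalizing cur with
  | nil => simp [pcaSp, PySem.Chars.upper]
  | cons c t ih =>
    show pcaSp _ (PySem.Chars.upperChar c :: PySem.Chars.upper t) _ = _
    simp only [pcaSp, pca_upperChar_eq_comma]
    split
    · have h0 := ih []
      simp only [show PySem.Chars.upper [] = [] from rfl] at h0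
      rw [h0]
      simp
    · rw [show PySem.Chars.upper cur ++ [PySem.Chars.upperChar c]
            = PySem.Chars.upper (cur ++ [c]) by simp [PySem.Chars.upper], ih (cur ++ [c])]

theorem pca_strip_ws_prefix (w y : List Char) (h : ∀ c ∈ w, PySem.Chars.isspace c = true) :
    PySem.Chars.strip (w ++ y) = PySem.Chars.strip y := by
  have hw : List.dropWhile PySem.Chars.isspace w = [] := List.dropWhile_eq_nil_iff.2 (by
    intro x hx; simpa using h x hx)
  unfold PySem.Chars.strip PySem.Chars.lstrip
  rw [List.dropWhile_append, hw]
  simp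

theorem pca_strip_ws_suffix (y w : List Char) (h : ∀ c ∈ w, PySem.Chars.isspace c = true) :
    PySem.Chars.strip (y ++ w) = PySem.Chars.strip y := by
  have hw : List.dropWhile PySem.Chars.isspace w.reverse = [] := List.dropWhile_eq_nil_iff.2 (by
    intro x hx; simpa using h x (by simpa using hx))
  by_cases hy : List.dropWhile PySem.Chars.isspace y = []
  · have hw2 : List.dropWhile PySem.Chars.isspace w = [] := List.dropWhile_eq_nil_iff.2 (by
      intro x hx; simpa using h x hx)
    have hyw : List.dropWhile PySem.Chars.isspace (y ++ w) = [] := by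
      rw [List.dropWhile_append, hy]
      simpa using hw2
    unfold PySem.Chars.strip PySem.Chars.lstrip PySem.Chars.rstrip
    rw [hy, hyw]
  · unfold PySem.Chars.strip PySem.Chars.lstrip PySem.Chars.rstrip
    rw [List.dropWhile_append, if_neg (by simpa using hy)]
    rw [List.reverse_append, List.dropWhile_append, hw]
    simp

theorem pca_strip_nil_all_ws (z : List Char) (h : PySem.Chars.strip z = []) :
    ∀ c ∈ z, PySem.Chars.isspace c = true := by
  intro c hc
  unfold PySem.Chars.strip PySem.Chars.lstrip PySem.Chars.rstrip at h
  have h0 : List.dropWhile PySem.Chars.isspace (List.dropWhile PySem.Chars.isspace z).reverse = [] := by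
    have := congrArg List.reverse h
    simpa using this
  have h3 : ∀ x ∈ List.dropWhile PySem.Chars.isspace z, PySem.Chars.isspace x = true := by
    intro x hx
    exact List.dropWhile_eq_nil_iff.1 h0 x (by simpa using hx)
  have hsplit : c ∈ List.takeWhile PySem.Chars.isspace z ++ List.dropWhile PySem.Chars.isspace z := by
    rw [List.takeWhile_append_dropWhile]; exact hc
  rcases List.mem_append.1 hsplit with h4 | h4
  · exact List.mem_takeWhile_imp h4
  · exact h3 c h4

theorem pca_ws_not_comma (c : Char) (h : PySem.Chars.isspace c = true) : (c == ',') = false := by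
  by_cases hc : c = ','
  · subst hc; exact absurd h (by decide)
  · simp [hc]

-- map strip over comma pieces ignores outer whitespace
theorem pca_mapstrip_lstrip (w y : List Char) (h : ∀ c ∈ w, PySem.Chars.isspace c = true) :
    (pcaSp (· == ',') (w ++ y) []).map PySem.Chars.strip
      = (pcaSp (· == ',') y []).map PySem.Chars.strip := by
  rw [pcaSp_append]
  rw [pcaSp_no _ w [] (fun c hc => pca_ws_not_comma c (h c hc))]
  have e1 : (([] ++ w : List Char) :: []).dropLast = ([] : List (List Char)) := rfl
  have e2 : (([] ++ w : List Char) :: []).getLastD [] = [] ++ w := rfl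
  rw [e1, e2, List.nil_append, List.nil_append]
  rcases List.eq_nil_or_concat (pcaSp (· == ',') y []) with hny | ⟨M, a, hMa⟩
  · exact absurd hny (pcaSp_ne_nil _ _ _)
  · rw [List.concat_eq_append] at hMa
    rw [pcaSp_cur _ y w, hMa]
    cases M with
    | nil =>
      simp only [List.nil_append, List.headI, List.tail_cons, List.map_cons]
      rw [pca_strip_ws_prefix w a h]
    | cons m ms =>
      simp only [List.cons_append, List.headI, List.tail_cons, List.map_cons]
      rw [pca_strip_ws_prefix w m h]

theorem pca_mapstrip_rstrip (y w : List Char) (h : ∀ c ∈ w, PySem.Chars.isspace c = true) :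
    (pcaSp (· == ',') (y ++ w) []).map PySem.Chars.strip
      = (pcaSp (· == ',') y []).map PySem.Chars.strip := by
  rw [pcaSp_append]
  rw [pcaSp_no _ w _ (fun c hc => pca_ws_not_comma c (h c hc))]
  rcases List.eq_nil_or_concat (pcaSp (· == ',') y []) with hny | ⟨M, a, hMa⟩
  · exact absurd hny (pcaSp_ne_nil _ _ _)
  · rw [List.concat_eq_append] at hMa
    rw [hMa]
    have e1 : (M ++ [a]).dropLast = M := by simp
    have e2 : (M ++ [a]).getLastD [] = a := by
      rw [List.getLastD_eq_getLast?]
      simp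
    rw [e1, e2, List.map_append, List.map_cons, List.map_nil, pca_strip_ws_suffix a w h]
    simp

theorem pca_mapstrip_strip (z : List Char) :
    (pcaSp (· == ',') (PySem.Chars.strip z) []).map PySem.Chars.strip
      = (pcaSp (· == ',') z []).map PySem.Chars.strip := by
  have hx : PySem.Chars.lstrip z
      = PySem.Chars.strip z ++ (List.takeWhile PySem.Chars.isspace (PySem.Chars.lstrip z).reverse).reverse := by
    conv_lhs => rw [← List.reverse_reverse (PySem.Chars.lstrip z),
      ← List.takeWhile_append_dropWhile (p := PySem.Chars.isspace) (l := (PySem.Chars.lstrip z).reverse)]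
    rw [List.reverse_append]
    rfl
  have hwR : ∀ c ∈ (List.takeWhile PySem.Chars.isspace (PySem.Chars.lstrip z).reverse).reverse,
      PySem.Chars.isspace c = true := by
    intro c hc
    exact List.mem_takeWhile_imp (by simpa using hc)
  have hwL : ∀ c ∈ List.takeWhile PySem.Chars.isspace z, PySem.Chars.isspace c = true := by
    intro c hc
    exact List.mem_takeWhile_imp hc
  have h1 : (pcaSp (· == ',') (PySem.Chars.lstrip z) []).map PySem.Chars.strip
      = (pcaSp (· == ',') (PySem.Chars.strip z) []).map PySem.Chars.strip := by
    rw [hx]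
    exact pca_mapstrip_rstrip _ _ hwR
  have h2 : (pcaSp (· == ',') z []).map PySem.Chars.strip
      = (pcaSp (· == ',') (PySem.Chars.lstrip z) []).map PySem.Chars.strip := by
    conv_lhs => rw [show z = List.takeWhile PySem.Chars.isspace z ++ PySem.Chars.lstrip z from
      (List.takeWhile_append_dropWhile).symm]
    exact pca_mapstrip_lstrip _ _ hwL
  rw [h2, h1]

-- ---- character-class helpers ----
theorem pca_S_subst (c : Char) (h : pcaS c = true) : pcaSubst c = ' ' := by
  simp only [pcaS, Bool.or_eq_true, beq_iff_eq] at h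
  rcases h with ((((h | h) | h) | h) | h) <;> subst h <;> rfl

theorem pca_notS_subst (c : Char) (h : pcaS c = false) : pcaSubst c = c := by
  simp only [pcaS, Bool.or_eq_false_iff, beq_eq_false_iff_ne, ne_eq] at h
  unfold pcaSubst
  rw [if_neg h.1.1.1.2, if_neg h.1.1.2, if_neg h.1.2, if_neg h.2]

theorem pca_S_delim (c : Char) (h : pcaS c = true) : pcaDelim c = true := by
  simp only [pcaS, Bool.or_eq_true, beq_iff_eq] at h
  rcases h with ((((h | h) | h) | h) | h) <;> subst h <;> rfl

theorem pca_notS_delim (c : Char) (h : pcaS c = false) : pcaDelim c = (c == ',') := by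
  simp only [pcaS, Bool.or_eq_false_iff, beq_eq_false_iff_ne, ne_eq] at h
  simp [pcaDelim, h.1.1.1.1, h.1.1.1.2, h.1.1.2, h.1.2, h.2]

theorem pca_notS_space (c : Char) (h : pcaS c = false) : (c == ' ') = false := by
  simp only [pcaS, Bool.or_eq_false_iff] at h
  exact h.1.1.1.1

-- pcaEmit as a function of the stripped piece
def pcaE0 (r : List Char) : List (List Char) :=
  if PySem.Chars.upper r ≠ [] ∧ pcaAscii (PySem.Chars.upper r) then [pcaDot (PySem.Chars.upper r)] else []

-- ---- SEG: A's per-part processing = B's per-piece emission ----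
theorem pca_seg (z : List Char) : pcaG z = (pcaSp (· == ',') z []).flatMap pcaEmit := by
  by_cases hz : PySem.Chars.strip z = []
  · rw [pcaG, if_neg (by simp [hz])]
    rw [pcaSp_no _ z [] (fun c hc => pca_ws_not_comma c (pca_strip_nil_all_ws z hz c hc))]
    simp [pcaEmit, hz, PySem.Chars.upper]
  · rw [pcaG, if_pos (by simp [hz])]
    have hup : pcaSp (· == ',') (PySem.Chars.upper (PySem.Chars.strip z)) []
        = (pcaSp (· == ',') (PySem.Chars.strip z) []).map PySem.Chars.upper := by
      have := pcaSp_upper (PySem.Chars.strip z) []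
      simpa [show PySem.Chars.upper [] = [] from rfl] using this
    rw [hup, List.flatMap_map]
    have hpt : ∀ q : List Char, pcaH (PySem.Chars.upper q) = pcaEmit q := by
      intro q
      unfold pcaH pcaEmit
      rw [pca_strip_upper]
      by_cases h1 : PySem.Chars.upper (PySem.Chars.strip q) = []
      · simp [h1]
      · by_cases h2 : pcaAscii (PySem.Chars.upper (PySem.Chars.strip q)) = true
        · simp [h1, h2]
        · simp [h1, h2]
    simp only [hpt]
    have hstr : ∀ L : List (List Char), L.flatMap pcaEmit = (L.map PySem.Chars.strip).flatMap pcaE0 := by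
      intro L
      rw [List.flatMap_map]
      rfl
    rw [hstr, hstr, pca_mapstrip_strip]

-- ---- C: two-level split = one-level split ----
theorem pca_C (cs cur : List Char) (h : ∀ c ∈ cur, pcaS c = false) :
    ((pcaSp (· == ' ') (cs.map pcaSubst) cur).flatMap pcaG)
      = (pcaSp pcaDelim (cur ++ cs) []).flatMap pcaEmit := by
  induction cs generalizing cur with
  | nil =>
    simp only [List.map_nil, List.append_nil]
    rw [show pcaSp (· == ' ') [] cur = [cur] from rfl, List.flatMap_cons, List.flatMap_nil,
      List.append_nil, pca_seg,
      pcaSp_congr pcaDelim (· == ',') cur [] (fun c hc => pca_notS_delim c (h c hc))]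
  | cons c t ih =>
    simp only [List.map_cons]
    by_cases hS : pcaS c = true
    · show (pcaSp (· == ' ') _ _).flatMap _ = _
      rw [show pcaSubst c = ' ' from pca_S_subst c hS]
      simp only [pcaSp, BEq.rfl, if_true]
      rw [List.flatMap_cons, ih [] (by simp)]
      rw [pcaSp_append pcaDelim cur (c :: t) []]
      simp only [pcaSp, pca_S_delim c hS, if_true]
      rcases List.eq_nil_or_concat (pcaSp pcaDelim cur []) with hny | ⟨M, a, hMa⟩
      · exact absurd hny (pcaSp_ne_nil _ _ _)
      · rw [List.concat_eq_append] at hMa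
        rw [hMa]
        have e1 : (M ++ [a]).dropLast = M := by simp
        have e2 : (M ++ [a]).getLastD [] = a := by
          rw [List.getLastD_eq_getLast?]; simp
        rw [e1, e2]
        rw [show M ++ a :: pcaSp pcaDelim t [] = (M ++ [a]) ++ pcaSp pcaDelim t [] by simp]
        rw [List.flatMap_append, ← hMa]
        congr 1
        rw [pca_seg, pcaSp_congr pcaDelim (· == ',') cur [] (fun x hx => pca_notS_delim x (h x hx))]
    · have hS' : pcaS c = false := by simpa using hS
      show (pcaSp (· == ' ') _ _).flatMap _ = _
      rw [show pcaSubst c = c from pca_notS_subst c hS']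
      simp only [pcaSp, pca_notS_space c hS', Bool.false_eq_true, if_false]
      rw [ih (cur ++ [c]) (by
        intro x hx
        rcases List.mem_append.1 hx with hx | hx
        · exact h x hx
        · simpa using (by simpa using hx : x = c) ▸ hS')]
      rw [List.append_assoc]
      rfl

-- ---- B-side characterisation ----
theorem pca_toks_sp (l buf : List Char) :
    pcaToks (l ++ [' ']) buf = ((pcaSp pcaDelim l buf).flatMap pcaEmit).map String.ofList := by
  induction l generalizing buf with
  | nil =>
    show pcaToks [' '] buf = _
    simp [pcaToks, pcaSp, show pcaDelim ' ' = true from rfl]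
  | cons c t ih =>
    show pcaToks (c :: (t ++ [' '])) buf = _
    simp only [pcaToks, pcaSp]
    by_cases hc : pcaDelim c = true
    · rw [if_pos hc, if_pos hc, ih []]
      simp
    · rw [if_neg hc, if_neg hc, ih (buf ++ [c])]

theorem pca_fold_fst (l : List Char) (s : PySem.Set String) (buf : List Char) :
    ((l.foldl pcaStep (s, buf)).1 : PySem.Set String) = List.foldl PySem.Set.add s (pcaToks l buf) := by
  induction l generalizing s buf with
  | nil => simp [pcaToks]
  | cons c t ih =>
    rw [List.foldl_cons]
    by_cases hc : pcaDelim c = true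
    · by_cases hcond : PySem.Chars.upper (PySem.Chars.strip buf) ≠ [] ∧
          (PySem.Chars.upper (PySem.Chars.strip buf)).all (fun c => c.toNat ≤ 127) = true
      · rw [show pcaStep (s, buf) c
            = (PySem.Set.add s (String.ofList (PySem.Chars.replace
                (PySem.Chars.upper (PySem.Chars.strip buf)) ['.'] ['-'])), ([] : List Char)) from by
          simp only [pcaStep]
          rw [if_pos hc]
          exact if_pos hcond]
        rw [ih, show pcaToks (c :: t) buf = (pcaEmit buf).map String.ofList ++ pcaToks t [] from by
          simp only [pcaToks]
          rw [if_pos hc]]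
        rw [show pcaEmit buf = [pcaDot (PySem.Chars.upper (PySem.Chars.strip buf))] from by
          unfold pcaEmit pcaAscii
          rw [if_pos hcond]]
        simp [pcaDot]
      · rw [show pcaStep (s, buf) c = (s, ([] : List Char)) from by
          simp only [pcaStep]
          rw [if_pos hc]
          exact if_neg hcond]
        rw [ih, show pcaToks (c :: t) buf = (pcaEmit buf).map String.ofList ++ pcaToks t [] from by
          simp only [pcaToks]
          rw [if_pos hc]]
        rw [show pcaEmit buf = [] from by
          unfold pcaEmit pcaAscii
          rw [if_neg hcond]]
        simp
    · rw [show pcaStep (s, buf) c = (s, buf ++ [c]) from by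
          simp only [pcaStep]
          rw [if_neg hc]]
      rw [ih, show pcaToks (c :: t) buf = pcaToks t (buf ++ [c]) from by
          simp only [pcaToks]
          rw [if_neg hc]]

-- ---- A-side characterisation ----
theorem pca_ofList_eq_empty (r : List Char) : (String.ofList r = "") ↔ r = [] := by
  constructor
  · intro h
    simpa using congrArg String.toList h
  · intro h
    subst h
    rfl

theorem pca_inner (L : List (List Char)) :
    (((L.filterMap (fun x => if PySem.Chars.strip x ≠ [] then some (PySem.Chars.strip x) else none)).filter
        pcaAscii).map pcaDot) = L.flatMap pcaH := by
  induction L with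
  | nil => rfl
  | cons x t ih =>
    rw [List.filterMap_cons, List.flatMap_cons]
    by_cases hx : PySem.Chars.strip x = []
    · rw [if_neg (by simp [hx]), ih, show pcaH x = [] from by unfold pcaH; rw [if_neg (by simp [hx])]]
      simp
    · rw [if_pos (by simp [hx]), List.filter_cons]
      by_cases ha : pcaAscii (PySem.Chars.strip x) = true
      · rw [if_pos (by simp [ha]), List.map_cons, ih,
          show pcaH x = [pcaDot (PySem.Chars.strip x)] from by
            unfold pcaH
            rw [if_pos (by simp [hx]), if_pos ha]]
        simp
      · rw [if_neg (by simp [ha]), ih, show pcaH x = [] from by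
          unfold pcaH
          rw [if_pos (by simp [hx]), if_neg ha]]
        simp

theorem pca_pipeline (P : List (List Char)) :
    ((((P.filterMap (fun q => if PySem.Chars.strip q ≠ [] then
          some (PySem.Chars.upper (PySem.Chars.strip q)) else none)).flatMap
        (fun y => (pcaSp (· == ',') y []).filterMap
          (fun x => if PySem.Chars.strip x ≠ [] then some (PySem.Chars.strip x) else none))).filter
            pcaAscii).map pcaDot)
      = P.flatMap pcaG := by
  induction P with
  | nil => rfl
  | cons q t ih =>
    rw [List.filterMap_cons, List.flatMap_cons]
    by_cases hq : PySem.Chars.strip q = []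
    · rw [if_neg (by simp [hq]), ih, show pcaG q = [] from by unfold pcaG; rw [if_neg (by simp [hq])]]
      simp
    · rw [if_pos (by simp [hq]), List.flatMap_cons, List.filter_append, List.map_append, ih,
        pca_inner, show (pcaSp (· == ',') (PySem.Chars.upper (PySem.Chars.strip q)) []).flatMap pcaH
            = pcaG q from by
          unfold pcaG
          rw [if_pos (by simp [hq])]]

theorem pca_filterMap_bridge {f : String → Option String} {fC : List Char → Option (List Char)}
    (hf : ∀ q, f (String.ofList q) = Option.map String.ofList (fC q)) (L : List (List Char)) :
    L.filterMap (f ∘ String.ofList) = (L.filterMap fC).map String.ofList := by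
  induction L with
  | nil => rfl
  | cons q t ih =>
    simp only [Function.comp_def] at ih ⊢
    rw [List.filterMap_cons, List.filterMap_cons, hf q]
    cases fC q <;> simp [ih]

theorem pca_flatMap_bridge {g : String → List String} {gC : List Char → List (List Char)}
    (hg : ∀ q, g (String.ofList q) = (gC q).map String.ofList) (L : List (List Char)) :
    (L.map String.ofList).flatMap g = (L.flatMap gC).map String.ofList := by
  induction L with
  | nil => rfl
  | cons q t ih =>
    rw [List.map_cons, List.flatMap_cons, List.flatMap_cons, hg q, ih, List.map_append]

theorem pca_split_comma (y : List Char) :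
    (PySem.Str.split? (String.ofList y) ",").getD []
      = (pcaSp (· == ',') y []).map String.ofList := by
  rw [show ("," : String) = String.ofList [','] from by decide, PySem.Str.split?,
    String.toList_ofList, String.toList_ofList, PySem.Chars.split?]
  rw [if_neg (by decide), Option.map_some, Option.getD_some, pca_splitOn_single]

theorem pca_stripF_bridge (x : List Char) :
    (if PySem.Str.strip (String.ofList x) ≠ "" then some (PySem.Str.strip (String.ofList x)) else none)
      = Option.map String.ofList
          (if PySem.Chars.strip x ≠ [] then some (PySem.Chars.strip x) else none) := by
  simp only [PySem.Str.strip, String.toList_ofList]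
  by_cases hx : PySem.Chars.strip x = []
  · rw [if_neg (by simp [hx]), if_neg (by simp [hx])]
    rfl
  · rw [if_pos (by simp [pca_ofList_eq_empty, hx]), if_pos (by simp [hx])]
    rfl

theorem pca_parts_char (raw : String) :
    pcaA_parts raw = ((pcaSp (· == ' ') (raw.toList.map pcaSubst) []).filterMap
      (fun q => if PySem.Chars.strip q ≠ [] then
        some (PySem.Chars.upper (PySem.Chars.strip q)) else none)).map String.ofList := by
  unfold pcaA_parts
  have hclean : (pcaA_cleaned raw).toList = raw.toList.map pcaSubst := by
    unfold pcaA_cleaned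
    simp only [PySem.Str.toList_replace,
      show ("\n" : String).toList = ['\n'] from by decide,
      show ("\t" : String).toList = ['\t'] from by decide,
      show (";" : String).toList = [';'] from by decide,
      show ("|" : String).toList = ['|'] from by decide,
      show (" " : String).toList = [' '] from by decide,
      pca_replace_single, List.map_map]
    refine List.map_congr_left ?_
    intro c _
    simp only [Function.comp]
    unfold pcaSubst
    by_cases h1 : c = '\n'
    · subst h1; rfl
    · by_cases h2 : c = '\t'
      · subst h2; rfl
      · by_cases h3 : c = ';'
        · subst h3; rfl
        · by_cases h4 : c = '|'
          · subst h4; rfl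
          · simp [h1, h2, h3, h4]
  rw [show (" " : String) = String.ofList [' '] from by decide, PySem.Str.split?,
    String.toList_ofList, PySem.Chars.split?]
  rw [if_neg (by decide), Option.map_some, Option.getD_some, pca_splitOn_single, hclean,
    List.filterMap_map]
  exact pca_filterMap_bridge (fun q => by
    simp only [PySem.Str.strip, String.toList_ofList]
    by_cases hq : PySem.Chars.strip q = []
    · rw [if_neg (by simp [pca_ofList_eq_empty, hq]), if_neg (by simp [hq])]
      rfl
    · rw [if_pos (by simp [pca_ofList_eq_empty, hq]), if_pos (by simp [hq])]
      simp only [PySem.Str.upper, String.toList_ofList]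
      rfl) _

theorem pca_out_char (raw : String) :
    pcaA_out raw = (((pcaSp (· == ' ') (raw.toList.map pcaSubst) []).filterMap
        (fun q => if PySem.Chars.strip q ≠ [] then
          some (PySem.Chars.upper (PySem.Chars.strip q)) else none)).flatMap
      (fun y => (pcaSp (· == ',') y []).filterMap
        (fun x => if PySem.Chars.strip x ≠ [] then some (PySem.Chars.strip x) else none))).map
      String.ofList := by
  unfold pcaA_out
  rw [PySem.List.foldl_append_eq_flatMap, List.nil_append, pca_parts_char raw]
  exact pca_flatMap_bridge (fun y => by
    rw [pca_split_comma, List.filterMap_map]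
    exact pca_filterMap_bridge pca_stripF_bridge _) _

theorem pca_A_char (raw : String) (h : raw ≠ "") :
    parse_custom_tickers raw =
      PySem.List.sorted (PySem.List.dedup
        (((pcaSp (· == ' ') (raw.toList.map pcaSubst) []).flatMap pcaG).map String.ofList))
        (fun x => x) := by
  unfold parse_custom_tickers
  rw [if_neg h]
  have hout2 : pcaA_out2 raw
      = (((pcaSp (· == ' ') (raw.toList.map pcaSubst) []).flatMap pcaG).map String.ofList) := by
    unfold pcaA_out2
    rw [pca_out_char raw, List.filter_map]
    rw [show (pyIsascii ∘ String.ofList) = pcaAscii from by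
      funext x
      simp [pyIsascii, pcaAscii]]
    rw [List.map_map]
    rw [show ((fun x => PySem.Str.replace x "." "-") ∘ String.ofList)
        = String.ofList ∘ pcaDot from by
      funext x
      simp only [Function.comp]
      simp only [PySem.Str.replace, String.toList_ofList,
        show ("." : String).toList = ['.'] from by decide,
        show ("-" : String).toList = ['-'] from by decide]
      rfl]
    rw [← List.map_map, ← pca_pipeline]
  rw [hout2]

-- ===== VERDICT (by name: the statement is the Claim_ definition above) =====
theorem parse_custom_tickers_spec : Claim_equal_parse_custom_tickers := by
  intro raw _
  unfold Spec_parse_custom_tickers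
  by_cases h : raw = ""
  · subst h
    decide
  · rw [pca_A_char raw h]
    unfold parse_custom_tickers_alt
    rw [pca_fold_fst, pca_toks_sp]
    rw [show pcaSp (· == ' ') (raw.toList.map pcaSubst) [] =
        pcaSp (fun x => x == ' ') (raw.toList.map pcaSubst) [] from rfl,
      pca_C raw.toList [] (by simp)]
    rw [List.nil_append, PySem.List.dedup_eq_ofList]
    rfl
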